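-- pv_equiv track=rewrite | github.com/softwareone-platform/swo-adobe-vipm-extension | adobe_vipm/flows/fulfillment/transfer.py | generate_deployments_currency_map
-- ===== SOURCE A (Python) =====
-- def generate_deployments_currency_map(line_items):
--     """
--     Generates a dictionary mapping deployment IDs to a list of their currency codes.
--
--     Args:
--         line_items (dict): The input dictionary containing transfer line items details.
--
--     Returns:
--         dict: A dictionary where the keys are deployment IDs and the values are lists of
--         currency codes.
--     """
--     deployment_currency_map = {}
--
--     for item in line_items:
--         deployment_id = item.get("deploymentId", "")
--         currency_code = item.get("currencyCode", "")
--
--         if deployment_id: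
--             if deployment_id not in deployment_currency_map:
--                 deployment_currency_map[deployment_id] = []
--             if currency_code not in deployment_currency_map[deployment_id]:
--                 deployment_currency_map[deployment_id].append(currency_code)
--
--     return deployment_currency_map
-- ===== SOURCE B (Python) =====
-- def generate_deployments_currency_map(line_items):
--     # Declarative re-computation: extract all (deploymentId, currencyCode) pairs,
--     # list the distinct non-empty deployment ids in first-seen order, then for each
--     # deployment rescan the pairs and take its currency codes, deduplicated in order.
--     pairs = [(item.get("deploymentId", ""), item.get("currencyCode", "")) for item in line_items]
--     deployments = list(dict.fromkeys(d for d, _ in pairs if d))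
--     return {
--         dep: list(dict.fromkeys(c for d, c in pairs if d == dep))
--         for dep in deployments
--     }
-- ===== Notes on version B (the rewrite author's own statement) =====
-- stated objective: alternative
-- what changed: A builds the mapping incrementally in one pass, mutating a dict with an inline membership check; B maintains no dict at all: it extracts the (deployment, currency) pairs, computes the distinct deployment ids in first-seen order, and for each deployment re-scans the pair list to collect and dedup its currency codes (per-key filter passes instead of a single accumulating fold).
import Mathlib
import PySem

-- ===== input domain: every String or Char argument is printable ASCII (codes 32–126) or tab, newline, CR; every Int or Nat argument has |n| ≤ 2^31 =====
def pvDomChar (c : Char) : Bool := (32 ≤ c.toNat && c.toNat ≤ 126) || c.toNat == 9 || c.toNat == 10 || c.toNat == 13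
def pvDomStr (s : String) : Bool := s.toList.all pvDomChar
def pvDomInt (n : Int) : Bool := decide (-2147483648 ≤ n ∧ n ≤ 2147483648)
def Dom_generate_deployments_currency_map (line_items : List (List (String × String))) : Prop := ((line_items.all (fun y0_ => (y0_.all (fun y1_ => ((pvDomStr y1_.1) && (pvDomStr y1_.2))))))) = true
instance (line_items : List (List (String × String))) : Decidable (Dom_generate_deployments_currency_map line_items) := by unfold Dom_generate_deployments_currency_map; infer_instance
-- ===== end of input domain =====

-- B drops A's incrementally mutated dict: it extracts all (deployment, currency) pairs, lists the distinct
-- deployment ids in first-seen order, and re-scans the pairs per deployment to collect its deduped codes.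

-- ===== PORT A =====
def generate_deployments_currency_map (line_items : List (List (String × String))) : List (String × List String) :=
  (line_items.foldl (fun deployment_currency_map item =>
      let deployment_id := (PySem.Dict.mk item).getD "deploymentId" ""
      let currency_code := (PySem.Dict.mk item).getD "currencyCode" ""
      if deployment_id ≠ "" then
        let d1 := if deployment_currency_map.contains deployment_id then deployment_currency_map
                  else deployment_currency_map.insert deployment_id []
        if currency_code ∉ d1.getD deployment_id [] then
          d1.modify deployment_id [] (fun v => v ++ [currency_code])
        else d1
      else deployment_currency_map)
    PySem.Dict.empty).items

-- ===== PORT B =====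
def generate_deployments_currency_map_alt (line_items : List (List (String × String))) : List (String × List String) :=
  let pairs := line_items.map (fun item =>
    ((PySem.Dict.mk item).getD "deploymentId" "", (PySem.Dict.mk item).getD "currencyCode" ""))
  let deployments := PySem.List.dedup ((pairs.filter (fun p => p.1 ≠ "")).map Prod.fst)
  deployments.map (fun dep =>
    (dep, PySem.List.dedup ((pairs.filter (fun p => p.1 == dep)).map Prod.snd)))

-- ===== PRECONDITION & SPEC =====
def Spec_generate_deployments_currency_map (line_items : List (List (String × String))) (out : List (String × List String)) : Prop := out = generate_deployments_currency_map_alt line_items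
instance (line_items : List (List (String × String))) (out : List (String × List String)) : Decidable (Spec_generate_deployments_currency_map line_items out) := by unfold Spec_generate_deployments_currency_map; infer_instance

-- ===== CLAIM (what is proved, stated in full; the proofs are below) =====
def Claim_equal_generate_deployments_currency_map : Prop := ∀ (line_items : List (List (String × String))), Dom_generate_deployments_currency_map line_items → Spec_generate_deployments_currency_map line_items (generate_deployments_currency_map line_items)

-- ===== LEMMAS AND PROOFS =====

-- proof-only helpers: A's loop body on the extracted pair, and B's three stages over a pair list
def pvPair (item : List (String × String)) : String × String :=
  ((PySem.Dict.mk item).getD "deploymentId" "", (PySem.Dict.mk item).getD "currencyCode" "")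

def pvStepA (d : PySem.Dict String (List String)) (p : String × String) : PySem.Dict String (List String) :=
  if p.1 ≠ "" then
    let d1 := if d.contains p.1 then d else d.insert p.1 []
    if p.2 ∉ d1.getD p.1 [] then d1.modify p.1 [] (fun v => v ++ [p.2]) else d1
  else d

def pvDeps (ps : List (String × String)) : List String :=
  PySem.List.dedup ((ps.filter (fun p => p.1 ≠ "")).map Prod.fst)

def pvCodes (ps : List (String × String)) (dep : String) : List String :=
  (ps.filter (fun p => p.1 == dep)).map Prod.snd

def pvSpec (ps : List (String × String)) : List (String × List String) :=
  (pvDeps ps).map (fun dep => (dep, PySem.List.dedup (pvCodes ps dep)))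

theorem pv_dedup_append_mem {v : List String} {c : String} (h : c ∈ v) :
    PySem.List.dedup (v ++ [c]) = PySem.List.dedup v := by
  have : PySem.Set.ofList (v ++ [c]) = PySem.Set.ofList v := by
    rw [PySem.Set.ofList_append, PySem.Set.update_cons, PySem.Set.update_nil]
    have hc : c ∈ PySem.Set.ofList v := (PySem.Set.mem_ofList v c).2 h
    simp [PySem.Set.add, hc]
  simpa [PySem.List.dedup] using this

theorem pv_dedup_append_not_mem {v : List String} {c : String} (h : c ∉ v) :
    PySem.List.dedup (v ++ [c]) = PySem.List.dedup v ++ [c] := by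
  have hc : c ∉ PySem.Set.ofList v := fun hm => h ((PySem.Set.mem_ofList v c).1 hm)
  have : PySem.Set.ofList (v ++ [c]) = PySem.Set.ofList v ++ [c] := by
    rw [PySem.Set.ofList_append, PySem.Set.update_cons, PySem.Set.update_nil]
    simp only [PySem.Set.add]
    rw [if_neg (by simpa using hc)]
  simpa [PySem.List.dedup] using this

-- lookup in a dict built as a pairing map over a key list
theorem pv_get?_pairing (l : List String) (f : String → List String) (x : String) :
    (PySem.Dict.mk (l.map (fun d => (d, f d)))).get? x
      = if x ∈ l then some (f x) else none := by
  induction l with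
  | nil => simp [PySem.Dict.get?]
  | cons a l ih =>
      by_cases h : a = x
      · subst h; simp [PySem.Dict.get?_mk_cons]
      · simp only [List.map_cons, PySem.Dict.get?_mk_cons, beq_iff_eq, if_neg h, ih,
          List.mem_cons]
        rcases em (x ∈ l) with hm | hm <;> simp [hm, Ne.symm h]

theorem pv_mem_deps_ne {ps : List (String × String)} {dep : String}
    (h : dep ∈ pvDeps ps) : dep ≠ "" := by
  unfold pvDeps at h
  rw [PySem.List.mem_dedup] at h
  obtain ⟨p, hp, rfl⟩ := List.mem_map.1 h
  exact of_decide_eq_true (List.mem_filter.1 hp).2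

theorem pv_codes_nil {ps : List (String × String)} {dep : String}
    (hne : dep ≠ "") (h : dep ∉ pvDeps ps) : pvCodes ps dep = [] := by
  unfold pvCodes
  rw [List.map_eq_nil_iff, List.filter_eq_nil_iff]
  intro p hp hpd
  apply h
  unfold pvDeps
  rw [PySem.List.mem_dedup]
  refine List.mem_map.2 ⟨p, List.mem_filter.2 ⟨hp, ?_⟩, by simpa using hpd⟩
  have : p.1 = dep := by simpa using hpd
  simpa [this] using hne

theorem pv_codes_append (ps : List (String × String)) (p : String × String) (dep : String) :
    pvCodes (ps ++ [p]) dep = pvCodes ps dep ++ (if p.1 == dep then [p.2] else []) := by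
  unfold pvCodes
  rw [List.filter_append, List.map_append]
  by_cases h : p.1 == dep <;> simp [h]

theorem pv_deps_append_empty (ps : List (String × String)) (p : String × String)
    (h : p.1 = "") : pvDeps (ps ++ [p]) = pvDeps ps := by
  unfold pvDeps
  rw [List.filter_append]
  simp [h]

theorem pv_deps_append (ps : List (String × String)) (p : String × String)
    (h : p.1 ≠ "") :
    pvDeps (ps ++ [p]) = if p.1 ∈ pvDeps ps then pvDeps ps else pvDeps ps ++ [p.1] := by
  unfold pvDeps
  have hf : List.filter (fun q : String × String => q.1 ≠ "") [p] = [p] := by simp [h]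
  rw [List.filter_append, hf, List.map_append, List.map_cons, List.map_nil]
  have hmem : p.1 ∈ (ps.filter (fun q => q.1 ≠ "")).map Prod.fst ↔
      p.1 ∈ PySem.List.dedup ((ps.filter (fun q => q.1 ≠ "")).map Prod.fst) :=
    (PySem.List.mem_dedup _ _).symm
  by_cases hm : p.1 ∈ PySem.List.dedup ((ps.filter (fun q => q.1 ≠ "")).map Prod.fst)
  · rw [if_pos hm]
    exact pv_dedup_append_mem (hmem.2 hm)
  · rw [if_neg hm]
    exact pv_dedup_append_not_mem (fun hx => hm (hmem.1 hx))

-- the central step: A's loop body advances B's three-stage description by one pair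
theorem pv_step (ps : List (String × String)) (p : String × String) :
    pvStepA (PySem.Dict.mk (pvSpec ps)) p = PySem.Dict.mk (pvSpec (ps ++ [p])) := by
  unfold pvStepA
  by_cases hdep : p.1 = ""
  · rw [if_neg (by simpa using hdep)]
    apply PySem.Dict.ext
    show pvSpec ps = _
    unfold pvSpec
    rw [pv_deps_append_empty ps p hdep]
    apply List.map_congr_left
    intro dep hd
    have hne := pv_mem_deps_ne hd
    rw [pv_codes_append]
    have hb : ¬ ("" = dep) := fun hh => hne hh.symm
    simp [hdep, hb]
  · rw [if_pos hdep]
    have hget := pv_get?_pairing (pvDeps ps) (fun dep => PySem.List.dedup (pvCodes ps dep)) p.1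
    by_cases hm : p.1 ∈ pvDeps ps
    · -- key already present
      have hc : (PySem.Dict.mk (pvSpec ps)).contains p.1 = true := by
        rw [PySem.Dict.contains_eq_isSome_get?]
        unfold pvSpec; rw [hget, if_pos hm]; rfl
      have hgd : (PySem.Dict.mk (pvSpec ps)).getD p.1 [] = PySem.List.dedup (pvCodes ps p.1) := by
        rw [PySem.Dict.getD_eq_get?_getD]
        unfold pvSpec; rw [hget, if_pos hm]; rfl
      simp only [hc, if_true, hgd]
      by_cases hcur : p.2 ∈ pvCodes ps p.1
      · have hcd : p.2 ∈ PySem.List.dedup (pvCodes ps p.1) :=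
          (PySem.List.mem_dedup _ _).2 hcur
        rw [if_neg (by simpa using hcd)]
        apply PySem.Dict.ext
        show pvSpec ps = _
        unfold pvSpec
        rw [pv_deps_append ps p hdep, if_pos hm]
        apply List.map_congr_left
        intro dep hd
        rw [pv_codes_append]
        by_cases hpd : p.1 = dep
        · subst hpd
          simp only [BEq.rfl, if_true]
          rw [pv_dedup_append_mem hcur]
        · have : (p.1 == dep) = false := by simpa using hpd
          simp [this]
      · have hcd : p.2 ∉ PySem.List.dedup (pvCodes ps p.1) := fun h =>
          hcur ((PySem.List.mem_dedup _ _).1 h)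
        rw [if_pos (by simpa using hcd)]
        simp only [PySem.Dict.modify, hgd]
        apply PySem.Dict.ext
        rw [PySem.Dict.items_insert_of_contains _ _ hc]
        show (pvSpec ps).map _ = pvSpec (ps ++ [p])
        unfold pvSpec
        rw [pv_deps_append ps p hdep, if_pos hm, List.map_map]
        apply List.map_congr_left
        intro dep hd
        by_cases hpd : p.1 = dep
        · subst hpd
          simp only [Function.comp, BEq.rfl, if_true, pv_codes_append]
          exact congrArg (p.1, ·) (pv_dedup_append_not_mem hcur).symm
        · have hb : (dep == p.1) = false := by simpa using Ne.symm hpd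
          have hb' : (p.1 == dep) = false := by simpa using hpd
          simp [Function.comp, hb, pv_codes_append, hb']
    · -- fresh key
      have hc : (PySem.Dict.mk (pvSpec ps)).contains p.1 = false := by
        rw [PySem.Dict.contains_eq_isSome_get?]
        unfold pvSpec; rw [hget, if_neg hm]; rfl
      rw [if_neg (ne_true_of_eq_false hc)]
      have hcodes : pvCodes ps p.1 = [] := pv_codes_nil hdep hm
      simp only [PySem.Dict.modify, PySem.Dict.getD_insert_self, List.nil_append]
      rw [if_pos (List.not_mem_nil), PySem.Dict.insert_insert_self]
      apply PySem.Dict.ext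
      rw [PySem.Dict.items_insert_of_not_contains _ _ hc]
      show pvSpec ps ++ [(p.1, [p.2])] = pvSpec (ps ++ [p])
      unfold pvSpec
      rw [pv_deps_append ps p hdep, if_neg hm, List.map_append]
      congr 1
      · apply List.map_congr_left
        intro dep hd
        have hpd : p.1 ≠ dep := fun h => hm (h ▸ hd)
        have hb : (p.1 == dep) = false := by simpa using hpd
        rw [pv_codes_append]
        simp [hb]
      · rw [List.map_cons, List.map_nil, pv_codes_append, hcodes]
        simp only [BEq.rfl, if_true, List.nil_append]
        have : PySem.List.dedup [p.2] = [p.2] := by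
          simpa using pv_dedup_append_not_mem (v := []) (c := p.2) (by simp)
        rw [this]

theorem pv_fold (ps : List (String × String)) :
    ps.foldl pvStepA PySem.Dict.empty = PySem.Dict.mk (pvSpec ps) := by
  induction ps using List.reverseRecOn with
  | nil => rfl
  | append_singleton ps p ih =>
      rw [List.foldl_append, List.foldl_cons, List.foldl_nil, ih, pv_step]

-- ===== VERDICT (by name: the statement is the Claim_ definition above) =====
theorem generate_deployments_currency_map_spec : Claim_equal_generate_deployments_currency_map := by
  intro line_items _
  unfold Spec_generate_deployments_currency_map generate_deployments_currency_map generate_deployments_currency_map_alt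
  have hfold : line_items.foldl
      (fun deployment_currency_map item =>
        let deployment_id := (PySem.Dict.mk item).getD "deploymentId" ""
        let currency_code := (PySem.Dict.mk item).getD "currencyCode" ""
        if deployment_id ≠ "" then
          let d1 := if deployment_currency_map.contains deployment_id then deployment_currency_map
                    else deployment_currency_map.insert deployment_id []
          if currency_code ∉ d1.getD deployment_id [] then
            d1.modify deployment_id [] (fun v => v ++ [currency_code])
          else d1
        else deployment_currency_map)
      PySem.Dict.empty
      = (line_items.map pvPair).foldl pvStepA PySem.Dict.empty := by
    rw [List.foldl_map]; rfl
  rw [hfold, pv_fold]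
  rfl
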